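-- pv_equiv track=rewrite | github.com/theabbie/leetcode | number-of-ways-to-separate-numbers.py | numberOfCombinations
-- ===== SOURCE A (Python) =====
-- M = 10 ** 9 + 7
--
-- def numberOfCombinations(num: str) -> int:
--     n = len(num)
--     dp = [[0] * (n + 1) for _ in range(n)]
--     lcp = [[0] * n for _ in range(n)]
--     for i in range(n - 1, -1, -1):
--         for j in range(n - 1, -1, -1):
--             lcp[i][j] = 1 + lcp[i + 1][j + 1] if i + 1 < n and j + 1 < n else 1
--             if num[i] != num[j]:
--                 lcp[i][j] = 0
--     for i in range(n - 1, -1, -1):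
--         if num[i] == "0":
--             continue
--         for l in range(n - i, 0, -1):
--             if l < n:
--                 dp[i][l] += dp[i][l + 1]
--             if i + l == n:
--                 dp[i][l] += 1
--                 continue
--             if i + 2 * l > n or lcp[i][i + l] >= l or num[i + lcp[i][i + l]] < num[i + l + lcp[i][i + l]]:
--                 dp[i][l] += dp[i + l][l]
--             else:
--                 dp[i][l] += dp[i + l][l + 1]
--             dp[i][l] %= M
--     return dp[0][1]
-- ===== SOURCE B (Python) =====
-- M = 10 ** 9 + 7
--
-- def numberOfCombinations(num: str) -> int:
--     # Forward-free reformulation: per start index, exact block counts via direct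
--     # slice comparison (no LCP table), then a suffix-sum row; rows built right-to-left.
--     n = len(num)
--     rows = [None] * n  # rows[i][l] = partitions of num[i:] with first block length >= l
--
--     def at(row, k):
--         return row[k] if row is not None and k < len(row) else 0
--
--     for i in range(n - 1, -1, -1):
--         m = n - i
--         if num[i] == '0':
--             rows[i] = [0] * (m + 2)
--             continue
--         exact = []
--         for l in range(1, m + 1):
--             j = i + l
--             if j == n:
--                 exact.append(1)
--             elif num[i:j] <= num[j:j + l]:
--                 exact.append(at(rows[j], l))
--             else:
--                 exact.append(at(rows[j], l + 1))
--         row = [0] * (m + 2)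
--         for l in range(m, 0, -1):
--             row[l] = (row[l + 1] + exact[l - 1]) % M
--         rows[i] = row
--     return rows[0][1]
-- ===== Notes on version B (the rewrite author's own statement) =====
-- stated objective: alternative
-- what changed: B drops A's O(n^2) LCP table and A's in-place 'first block length >= l' accumulator updated by three += steps per cell; instead it builds, right to left, one row per start index by first computing exact per-length block counts with direct slice comparisons (num[i:j] <= num[j:j+l]) and then a separate suffix-sum pass.
-- outside the precondition, e.g. on numberOfCombinations(''): A raises IndexError, B raises IndexError
import Mathlib
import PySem

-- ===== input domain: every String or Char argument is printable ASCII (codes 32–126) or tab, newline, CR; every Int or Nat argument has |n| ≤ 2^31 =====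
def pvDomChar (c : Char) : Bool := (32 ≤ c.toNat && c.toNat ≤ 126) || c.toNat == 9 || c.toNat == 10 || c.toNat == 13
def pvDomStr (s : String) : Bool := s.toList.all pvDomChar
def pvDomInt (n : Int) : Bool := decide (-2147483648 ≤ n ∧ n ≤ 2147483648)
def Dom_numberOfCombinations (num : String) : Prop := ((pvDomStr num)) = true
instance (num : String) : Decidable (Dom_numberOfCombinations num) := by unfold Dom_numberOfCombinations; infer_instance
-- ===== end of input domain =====

-- B replaces A's LCP table and in-place "length ≥ l" accumulation by direct slice
-- comparisons plus per-row exact block counts followed by a suffix-sum pass (objective: alternative).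

-- ===== PORT A =====
def pvM : Int := 10 ^ 9 + 7

-- num[i] (always in range where A reads it)
def pvGetc (cs : List Char) (i : Int) : Char := PySem.List.pyGetD cs i ' '

-- t[i][j] read / write (always in range where A reads/writes)
def pvGet2 (t : List (List Int)) (i j : Int) : Int :=
  PySem.List.pyGetD (PySem.List.pyGetD t i []) j 0

def pvSet2 (t : List (List Int)) (i j : Int) (v : Int) : List (List Int) :=
  PySem.List.pySetD t i (PySem.List.pySetD (PySem.List.pyGetD t i []) j v)

-- body of A's inner lcp loop (one j step)
def pvLcpInner (cs : List Char) (i : Int) (t : List (List Int)) (j : Int) : List (List Int) :=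
  let n : Int := PySem.List.len cs
  let t1 := pvSet2 t i j (if i + 1 < n ∧ j + 1 < n then 1 + pvGet2 t (i + 1) (j + 1) else 1)
  if pvGetc cs i ≠ pvGetc cs j then pvSet2 t1 i j 0 else t1

-- A's lcp table loops
def pvLcpTable (cs : List Char) : List (List Int) :=
  let n : Int := PySem.List.len cs
  (PySem.List.pyRange (n - 1) (-1) (-1)).foldl
    (fun t i => (PySem.List.pyRange (n - 1) (-1) (-1)).foldl (pvLcpInner cs i) t)
    (List.replicate cs.length (List.replicate cs.length 0))

-- body of A's inner dp loop (one l step)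
def pvDpInner (cs : List Char) (lcp : List (List Int)) (i : Int)
    (t : List (List Int)) (l : Int) : List (List Int) :=
  let n : Int := PySem.List.len cs
  let t1 := if l < n then pvSet2 t i l (pvGet2 t i l + pvGet2 t i (l + 1)) else t
  if i + l = n then pvSet2 t1 i l (pvGet2 t1 i l + 1)
  else
    let t2 :=
      if i + 2 * l > n ∨ pvGet2 lcp i (i + l) ≥ l ∨
          pvGetc cs (i + pvGet2 lcp i (i + l)) < pvGetc cs (i + l + pvGet2 lcp i (i + l)) then
        pvSet2 t1 i l (pvGet2 t1 i l + pvGet2 t1 (i + l) l)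
      else
        pvSet2 t1 i l (pvGet2 t1 i l + pvGet2 t1 (i + l) (l + 1))
    pvSet2 t2 i l (PySem.Int.mod (pvGet2 t2 i l) pvM)

-- A's dp table loops
def pvDpTable (cs : List Char) (lcp : List (List Int)) : List (List Int) :=
  let n : Int := PySem.List.len cs
  (PySem.List.pyRange (n - 1) (-1) (-1)).foldl
    (fun t i =>
      if pvGetc cs i = '0' then t
      else (PySem.List.pyRange (n - i) 0 (-1)).foldl (pvDpInner cs lcp i) t)
    (List.replicate cs.length (List.replicate (cs.length + 1) 0))

def numberOfCombinations (num : String) : Int :=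
  pvGet2 (pvDpTable num.toList (pvLcpTable num.toList)) 0 1

-- ===== PORT B =====
-- Python str <= str : lexicographic comparison by code point (exact)
def pvLexLe : List Char → List Char → Bool
  | [], _ => true
  | _ :: _, [] => false
  | a :: as, b :: bs => if a < b then true else if b < a then false else pvLexLe as bs

-- B's helper at(row, k)
def pvAt (row : Option (List Int)) (k : Int) : Int :=
  match row with
  | none => 0
  | some r => if k < PySem.List.len r then PySem.List.pyGetD r k 0 else 0

-- one entry of B's `exact` list (the appended value for block length l)
def pvExactB (cs : List Char) (rows : List (Option (List Int))) (i l : Int) : Int :=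
  let n : Int := PySem.List.len cs
  let j := i + l
  if j = n then 1
  else if pvLexLe (PySem.List.slice cs (some i) (some j))
            (PySem.List.slice cs (some j) (some (j + l))) then
    pvAt (PySem.List.pyGetD rows j none) l
  else
    pvAt (PySem.List.pyGetD rows j none) (l + 1)

-- one iteration of B's main loop (build row i from the rows to its right)
def pvRowB (cs : List Char) (rows : List (Option (List Int))) (i : Int) : List (Option (List Int)) :=
  let n : Int := PySem.List.len cs
  let m : Int := n - i
  if pvGetc cs i = '0' then
    PySem.List.pySetD rows i (some (List.replicate (m + 2).toNat 0))
  else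
    let exact := (PySem.List.pyRange 1 (m + 1) 1).foldl
      (fun ex l => ex ++ [pvExactB cs rows i l]) []
    let row := (PySem.List.pyRange m 0 (-1)).foldl
      (fun row l =>
        PySem.List.pySetD row l
          (PySem.Int.mod (PySem.List.pyGetD row (l + 1) 0 + PySem.List.pyGetD exact (l - 1) 0) pvM))
      (List.replicate (m + 2).toNat 0)
    PySem.List.pySetD rows i (some row)

-- B's main loop: build rows from the right
def pvRowsB (cs : List Char) : List (Option (List Int)) :=
  let n : Int := PySem.List.len cs
  (PySem.List.pyRange (n - 1) (-1) (-1)).foldl (pvRowB cs) (List.replicate cs.length none)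

def numberOfCombinations_alt (num : String) : Int :=
  match PySem.List.pyGetD (pvRowsB num.toList) 0 none with
  | some r => PySem.List.pyGetD r 1 0
  | none => 0

-- ===== PRECONDITION & SPEC =====
-- A raises IndexError on the empty string (dp[0][1] on an empty table); excluded.
def Pre_numberOfCombinations (num : String) : Prop := num ≠ ""
instance (num : String) : Decidable (Pre_numberOfCombinations num) := by
  unfold Pre_numberOfCombinations; infer_instance

def pvWitness_numberOfCombinations : String := "1"

def Spec_numberOfCombinations (num : String) (out : Int) : Prop := out = numberOfCombinations_alt num
instance (num : String) (out : Int) : Decidable (Spec_numberOfCombinations num out) := by unfold Spec_numberOfCombinations; infer_instance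

-- ===== CLAIM (what is proved, stated in full; the proofs are below) =====
def Claim_equal_numberOfCombinations : Prop := ∀ (num : String), Dom_numberOfCombinations num → Pre_numberOfCombinations num → Spec_numberOfCombinations num (numberOfCombinations num)

-- ===== LEMMAS AND PROOFS =====
def pvG (t : List (List Int)) (i j : Nat) : Int := (t.getD i []).getD j 0

theorem pv_getD_set_eq {α : Type} (xs : List α) (m : Nat) (v d : α) (h : m < xs.length) :
    (xs.set m v).getD m d = v := by
  simp [List.getD_eq_getElem?_getD, h]

theorem pv_getD_set_ne {α : Type} (xs : List α) (m k : Nat) (v d : α) (h : k ≠ m) :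
    (xs.set m v).getD k d = xs.getD k d := by
  simp [List.getD_eq_getElem?_getD, List.getElem?_set_ne (Ne.symm h)]

theorem pvGet2_cast (t : List (List Int)) (i j : Nat) : pvGet2 t ↑i ↑j = pvG t i j := by
  simp [pvGet2, pvG]

theorem pvSet2_cast (t : List (List Int)) (i j : Nat) (v : Int) :
    pvSet2 t ↑i ↑j v = t.set i ((t.getD i []).set j v) := by
  simp [pvSet2]

theorem pvGetc_cast (cs : List Char) (i : Nat) : pvGetc cs ↑i = cs.getD i ' ' := by
  simp [pvGetc]

theorem pvG_set2_eq (t : List (List Int)) (i j : Nat) (v : Int)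
    (hi : i < t.length) (hj : j < (t.getD i []).length) :
    pvG (t.set i ((t.getD i []).set j v)) i j = v := by
  unfold pvG
  rw [pv_getD_set_eq _ _ _ _ hi, pv_getD_set_eq _ _ _ _ hj]

theorem pvG_set2_ne (t : List (List Int)) (i j i' j' : Nat) (v : Int)
    (h : i' ≠ i ∨ j' ≠ j) :
    pvG (t.set i ((t.getD i []).set j v)) i' j' = pvG t i' j' := by
  unfold pvG
  by_cases hii : i' = i
  · subst hii
    rcases h with h | h
    · exact absurd rfl h
    · by_cases hlen : i' < t.length
      · rw [pv_getD_set_eq _ _ _ _ hlen, pv_getD_set_ne _ _ _ _ _ h]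
      · have h1 : t.getD i' [] = [] := List.getD_eq_default _ _ (Nat.le_of_not_lt hlen)
        rw [h1]
        simp only [List.set_nil]
        rw [List.getD_eq_default (t.set i' []) _ (show (t.set i' []).length ≤ i' by simp; omega)]
  · rw [pv_getD_set_ne _ _ _ _ _ hii]

def pvLcpN (cs : List Char) (i j : Nat) : Nat :=
  if cs.getD i ' ' ≠ cs.getD j ' ' then 0
  else if h : i + 1 < cs.length ∧ j + 1 < cs.length then 1 + pvLcpN cs (i+1) (j+1) else 1
termination_by cs.length - i
decreasing_by omega

def pvLens (cs : List Char) (t : List (List Int)) (w : Nat) : Prop :=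
  t.length = cs.length ∧ ∀ r, r < cs.length → ((t.getD r []).length = w)

theorem lcpInner_effect (cs : List Char) (t : List (List Int)) (i j : Nat)
    (hl : pvLens cs t cs.length)
    (hi : i < cs.length) (hj : j < cs.length)
    (habove : ∀ i' j', i < i' → i' < cs.length → j' < cs.length →
      pvG t i' j' = ↑(pvLcpN cs i' j')) :
    pvLens cs (pvLcpInner cs ↑i t ↑j) cs.length ∧
    (∀ i' j', (i' ≠ i ∨ j' ≠ j) → pvG (pvLcpInner cs ↑i t ↑j) i' j' = pvG t i' j') ∧
    pvG (pvLcpInner cs ↑i t ↑j) i j = ↑(pvLcpN cs i j) := by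
  obtain ⟨hlen, hrow⟩ := hl
  have hcast1 : (↑i + 1 : Int) = ↑(i+1) := by push_cast; ring
  have hcast2 : (↑j + 1 : Int) = ↑(j+1) := by push_cast; ring
  simp only [pvLcpInner, hcast1, hcast2, PySem.List.len_eq, pvGetc_cast, pvGet2_cast,
    pvSet2_cast, Nat.cast_lt]
  set v : Int := if (i+1 : Nat) < cs.length ∧ (j+1 : Nat) < cs.length
    then 1 + pvG t (i+1) (j+1) else 1 with hv
  have hvval : v = ↑(pvLcpN cs i j) ∨ cs.getD i ' ' ≠ cs.getD j ' ' := by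
    by_cases hc : cs.getD i ' ' = cs.getD j ' '
    · left
      rw [pvLcpN, if_neg (fun hne => hne hc)]
      by_cases hb : i + 1 < cs.length ∧ j + 1 < cs.length
      · rw [dif_pos hb, hv, if_pos hb, habove (i+1) (j+1) (by omega) hb.1 hb.2]
        push_cast; ring
      · rw [dif_neg hb, hv, if_neg hb]; simp
    · right; exact hc
  have hri : (t.getD i []).length = cs.length := hrow i hi
  have hlen1 : (t.set i ((t.getD i []).set j v)).length = cs.length := by simp [hlen]
  have hrow1 : ∀ r, r < cs.length →
      (((t.set i ((t.getD i []).set j v)).getD r []).length = cs.length) := by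
    intro r hr
    by_cases hri' : r = i
    · subst hri'
      rw [pv_getD_set_eq _ _ _ _ (by omega), List.length_set, hri]
    · rw [pv_getD_set_ne _ _ _ _ _ hri']; exact hrow r hr
  split_ifs with hc
  · -- chars differ: second set to 0
    refine ⟨⟨by simp [hlen], ?_⟩, ?_, ?_⟩
    · intro r hr
      by_cases hri' : r = i
      · subst hri'
        rw [pv_getD_set_eq _ _ _ _ (by rw [hlen1]; omega), List.length_set]
        exact hrow1 _ hr
      · rw [pv_getD_set_ne _ _ _ _ _ hri']; exact hrow1 r hr
    · intro i' j' hne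
      rw [pvG_set2_ne _ _ _ _ _ _ hne, pvG_set2_ne _ _ _ _ _ _ hne]
    · rw [pvG_set2_eq _ _ _ _ (by rw [hlen1]; omega)
        (by rw [pv_getD_set_eq _ _ _ _ (by omega), List.length_set, hri]; omega)]
      rw [pvLcpN, if_pos hc]
      simp
  · -- chars equal: single set
    have hveq : v = ↑(pvLcpN cs i j) := by
      exact hvval.resolve_right hc
    refine ⟨⟨hlen1, hrow1⟩, ?_, ?_⟩
    · intro i' j' hne; exact pvG_set2_ne _ _ _ _ _ _ hne
    · rw [pvG_set2_eq _ _ _ _ (by omega) (by rw [hri]; omega), hveq]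

theorem lcpRow (cs : List Char) (i : Nat) (hi : i < cs.length) :
    ∀ (j0 : Nat), j0 ≤ cs.length → ∀ t : List (List Int), pvLens cs t cs.length →
    (∀ i' j', i < i' → i' < cs.length → j' < cs.length →
      pvG t i' j' = ↑(pvLcpN cs i' j')) →
    pvLens cs ((PySem.List.pyRange (↑j0 - 1) (-1) (-1)).foldl (pvLcpInner cs ↑i) t) cs.length ∧
    (∀ i' j', i' ≠ i →
      pvG ((PySem.List.pyRange (↑j0 - 1) (-1) (-1)).foldl (pvLcpInner cs ↑i) t) i' j' = pvG t i' j') ∧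
    (∀ j', j' < j0 →
      pvG ((PySem.List.pyRange (↑j0 - 1) (-1) (-1)).foldl (pvLcpInner cs ↑i) t) i j' = ↑(pvLcpN cs i j')) ∧
    (∀ j', j0 ≤ j' →
      pvG ((PySem.List.pyRange (↑j0 - 1) (-1) (-1)).foldl (pvLcpInner cs ↑i) t) i j' = pvG t i j') := by
  intro j0
  induction j0 with
  | zero =>
    intro _ t hl _
    rw [show ((0:Nat):Int) - 1 = -1 by norm_num, PySem.List.pyRange_neg_one_eq_nil le_rfl]
    exact ⟨hl, fun _ _ _ => rfl, fun _ h => absurd h (by omega), fun _ _ => rfl⟩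
  | succ j0 ih =>
    intro hj0 t hl habove
    rw [show ((↑(j0+1):Int)) - 1 = ↑j0 by push_cast; ring,
      PySem.List.pyRange_neg_one_cons (by omega), List.foldl_cons]
    obtain ⟨hl1, hunch, heq⟩ := lcpInner_effect cs t i j0 hl hi (by omega) habove
    have habove1 : ∀ i' j', i < i' → i' < cs.length → j' < cs.length →
        pvG (pvLcpInner cs ↑i t ↑j0) i' j' = ↑(pvLcpN cs i' j') := by
      intro i' j' h1 h2 h3
      rw [hunch i' j' (Or.inl (by omega))]; exact habove i' j' h1 h2 h3
    obtain ⟨rl, runch, rlow, rhigh⟩ := ih (by omega) (pvLcpInner cs ↑i t ↑j0) hl1 habove1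
    refine ⟨rl, ?_, ?_, ?_⟩
    · intro i' j' hne
      rw [runch i' j' hne, hunch i' j' (Or.inl hne)]
    · intro j' hj'
      by_cases h : j' < j0
      · exact rlow j' h
      · have : j' = j0 := by omega
        subst this
        rw [rhigh j' le_rfl, heq]
    · intro j' hj'
      rw [rhigh j' (by omega), hunch i j' (Or.inr (by omega))]

theorem lcpOuter (cs : List Char) :
    ∀ (i0 : Nat), i0 ≤ cs.length → ∀ t : List (List Int), pvLens cs t cs.length →
    (∀ i' j', i0 ≤ i' → i' < cs.length → j' < cs.length →
      pvG t i' j' = ↑(pvLcpN cs i' j')) →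
    pvLens cs ((PySem.List.pyRange (↑i0 - 1) (-1) (-1)).foldl
      (fun t i => (PySem.List.pyRange ((PySem.List.len cs) - 1) (-1) (-1)).foldl (pvLcpInner cs i) t) t) cs.length ∧
    (∀ i' j', i' < cs.length → j' < cs.length →
      pvG ((PySem.List.pyRange (↑i0 - 1) (-1) (-1)).foldl
        (fun t i => (PySem.List.pyRange ((PySem.List.len cs) - 1) (-1) (-1)).foldl (pvLcpInner cs i) t) t) i' j'
        = ↑(pvLcpN cs i' j')) := by
  intro i0
  induction i0 with
  | zero =>
    intro _ t hl habove
    rw [show ((0:Nat):Int) - 1 = -1 by norm_num, PySem.List.pyRange_neg_one_eq_nil le_rfl]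
    exact ⟨hl, fun i' j' h1 h2 => habove i' j' (by omega) h1 h2⟩
  | succ i0 ih =>
    intro hi0 t hl habove
    have hrange : (PySem.List.len cs) - 1 = ((cs.length : Int)) - 1 := by
      simp [PySem.List.len_eq]
    rw [hrange, show ((↑(i0+1):Int)) - 1 = ↑i0 by push_cast; ring,
      PySem.List.pyRange_neg_one_cons (show (-1:Int) < (i0:Int) by omega), List.foldl_cons]
    have hi : i0 < cs.length := by omega
    obtain ⟨hl1, hunch, hlow, hhigh⟩ := by
      have := lcpRow cs i0 hi cs.length le_rfl t hl
        (fun i' j' h1 h2 h3 => habove i' j' (by omega) h2 h3)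
      exact this
    apply ih (by omega)
    · exact hl1
    · intro i' j' h1 h2 h3
      by_cases h : i' = i0
      · subst h; exact hlow j' h3
      · rw [hunch i' j' h]
        exact habove i' j' (by omega) h2 h3

theorem pvLcpTable_spec (cs : List Char) :
    pvLens cs (pvLcpTable cs) cs.length ∧
    (∀ i j, i < cs.length → j < cs.length →
      pvG (pvLcpTable cs) i j = ↑(pvLcpN cs i j)) := by
  have hinit : pvLens cs (List.replicate cs.length (List.replicate cs.length (0:Int))) cs.length := by
    constructor
    · simp
    · intro r hr
      rw [List.getD_eq_getElem?_getD]
      simp [List.getElem?_replicate, hr]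
  have h := lcpOuter cs cs.length le_rfl _ hinit (fun i' j' h1 h2 _ => absurd h1 (by omega))
  have hrw : pvLcpTable cs = (PySem.List.pyRange ((cs.length:Int) - 1) (-1) (-1)).foldl
      (fun t i => (PySem.List.pyRange ((PySem.List.len cs) - 1) (-1) (-1)).foldl (pvLcpInner cs i) t)
      (List.replicate cs.length (List.replicate cs.length 0)) := by
    simp [pvLcpTable, PySem.List.len_eq]
  rw [hrw]
  exact ⟨h.1, fun i j hi hj => h.2 i j hi hj⟩

def pvDpF (cs : List Char) (i l : Nat) : Int :=
  if h : cs.length ≤ i ∨ cs.getD i ' ' = '0' ∨ l < 1 ∨ cs.length - i < l then 0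
  else
    if i + l = cs.length then (if hl : l < cs.length then pvDpF cs i (l+1) else 0) + 1
    else
      PySem.Int.mod
        ((if hl : l < cs.length then pvDpF cs i (l+1) else 0) +
         (if cs.length < i + 2*l ∨ l ≤ pvLcpN cs i (i+l) ∨
             cs.getD (i + pvLcpN cs i (i+l)) ' ' < cs.getD (i+l + pvLcpN cs i (i+l)) ' '
          then pvDpF cs (i+l) l else pvDpF cs (i+l) (l+1))) pvM
termination_by (cs.length - i) * (cs.length + 1) + (cs.length - l)
decreasing_by
  · omega
  · omega
  · push_neg at h
    have h1 : cs.length - (i + l) ≤ cs.length - i - 1 := by omega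
    have h2 : (cs.length - (i+l)) * (cs.length + 1) ≤ (cs.length - i - 1) * (cs.length + 1) :=
      Nat.mul_le_mul_right _ h1
    have h3 : (cs.length - i - 1) * (cs.length + 1) + (cs.length + 1) = (cs.length - i) * (cs.length + 1) := by
      have hh : cs.length - i - 1 + 1 = cs.length - i := by omega
      calc (cs.length - i - 1) * (cs.length + 1) + (cs.length + 1)
          = (cs.length - i - 1 + 1) * (cs.length + 1) := by ring
        _ = (cs.length - i) * (cs.length + 1) := by rw [hh]
    omega
  · push_neg at h
    have h1 : cs.length - (i + l) ≤ cs.length - i - 1 := by omega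
    have h2 : (cs.length - (i+l)) * (cs.length + 1) ≤ (cs.length - i - 1) * (cs.length + 1) :=
      Nat.mul_le_mul_right _ h1
    have h3 : (cs.length - i - 1) * (cs.length + 1) + (cs.length + 1) = (cs.length - i) * (cs.length + 1) := by
      have hh : cs.length - i - 1 + 1 = cs.length - i := by omega
      calc (cs.length - i - 1) * (cs.length + 1) + (cs.length + 1)
          = (cs.length - i - 1 + 1) * (cs.length + 1) := by ring
        _ = (cs.length - i) * (cs.length + 1) := by rw [hh]
    omega

theorem pvLens_set2 (cs : List Char) (t : List (List Int)) (w : Nat) (i j : Nat) (v : Int)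
    (hi : i < cs.length) (hl : pvLens cs t w) :
    pvLens cs (t.set i ((t.getD i []).set j v)) w := by
  obtain ⟨h1, h2⟩ := hl
  refine ⟨by simp [h1], ?_⟩
  intro r hr
  by_cases hri : r = i
  · subst hri
    rw [pv_getD_set_eq _ _ _ _ (by omega), List.length_set]
    exact h2 r hr
  · rw [pv_getD_set_ne _ _ _ _ _ hri]; exact h2 r hr

theorem dpInner_effect (cs : List Char) (lcp t : List (List Int)) (i l : Nat)
    (hlcp : ∀ a b, a < cs.length → b < cs.length → pvG lcp a b = ↑(pvLcpN cs a b))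
    (hi : i < cs.length) (hc0 : ¬ cs.getD i ' ' = '0')
    (hl1 : 1 ≤ l) (hl2 : l ≤ cs.length - i)
    (hlen : pvLens cs t (cs.length + 1))
    (habove : ∀ i' l', i < i' → i' < cs.length → l' ≤ cs.length → pvG t i' l' = pvDpF cs i' l')
    (hhi : ∀ l', l < l' → l' ≤ cs.length → pvG t i l' = pvDpF cs i l')
    (hlo : ∀ l', l' ≤ l → pvG t i l' = 0) :
    pvLens cs (pvDpInner cs lcp ↑i t ↑l) (cs.length + 1) ∧
    (∀ i' l', (i' ≠ i ∨ l' ≠ l) → pvG (pvDpInner cs lcp ↑i t ↑l) i' l' = pvG t i' l') ∧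
    pvG (pvDpInner cs lcp ↑i t ↑l) i l = pvDpF cs i l := by
  have hrlen : (t.getD i []).length = cs.length + 1 := hlen.2 i hi
  have c1 : (↑i + ↑l : Int) = ↑(i + l) := by push_cast; ring
  have c2 : (↑l + 1 : Int) = ↑(l + 1) := by push_cast; ring
  -- the value written by the first conditional set
  set b : Int := if l < cs.length then pvDpF cs i (l+1) else 0 with hb
  have hbase : (if (↑l : Int) < PySem.List.len cs then
        pvSet2 t ↑i ↑l (pvGet2 t ↑i ↑l + pvGet2 t ↑i (↑l + 1)) else t)
      = (if l < cs.length then t.set i ((t.getD i []).set l b) else t) := by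
    by_cases hln : l < cs.length
    · rw [if_pos (by simp [PySem.List.len_eq]; omega), if_pos hln]
      rw [c2, pvSet2_cast, pvGet2_cast, pvGet2_cast, hlo l le_rfl, hhi (l+1) (by omega) (by omega)]
      rw [hb, if_pos hln, zero_add]
    · rw [if_neg (by simp [PySem.List.len_eq]; omega), if_neg hln]
  -- continue
  have hg2e : ∀ (t' : List (List Int)) (j : Nat) (v : Int), pvLens cs t' (cs.length+1) → j ≤ cs.length →
      pvG (t'.set i ((t'.getD i []).set j v)) i j = v := by
    intro t' j v hl hj
    exact pvG_set2_eq _ _ _ _ (by rw [hl.1]; omega) (by rw [hl.2 i hi]; omega)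
  set t1 : List (List Int) := if l < cs.length then t.set i ((t.getD i []).set l b) else t with ht1
  have hlen1 : pvLens cs t1 (cs.length + 1) := by
    rw [ht1]; split_ifs
    · exact pvLens_set2 cs t _ i l b hi hlen
    · exact hlen
  have ht1il : pvG t1 i l = b := by
    rw [ht1]; split_ifs with h
    · exact hg2e t l b hlen (by omega)
    · rw [hlo l le_rfl, hb, if_neg h]
  have ht1un : ∀ i' l', (i' ≠ i ∨ l' ≠ l) → pvG t1 i' l' = pvG t i' l' := by
    intro i' l' hne
    rw [ht1]; split_ifs
    · exact pvG_set2_ne _ _ _ _ _ _ hne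
    · rfl
  simp only [pvDpInner]
  rw [hbase]
  by_cases hiln : i + l = cs.length
  · rw [if_pos (by simp only [PySem.List.len_eq]; omega)]
    rw [pvSet2_cast, pvGet2_cast, ht1il]
    refine ⟨pvLens_set2 cs t1 _ i l _ hi hlen1, ?_, ?_⟩
    · intro i' l' hne
      rw [pvG_set2_ne _ _ _ _ _ _ hne, ht1un i' l' hne]
    · rw [hg2e t1 l (b+1) hlen1 (by omega)]
      rw [pvDpF, dif_neg (by simp only [not_or, not_le, not_lt]; exact ⟨by omega, hc0, by omega, by omega⟩),
        if_pos hiln, hb]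
      by_cases hln : l < cs.length
      · rw [dif_pos hln, if_pos hln]
      · rw [dif_neg hln, if_neg hln]
  · rw [if_neg (by simp only [PySem.List.len_eq]; omega)]
    have hiln' : i + l < cs.length := by omega
    have hlcpv : pvGet2 lcp ↑i (↑i + ↑l) = ↑(pvLcpN cs i (i+l)) := by
      rw [c1, pvGet2_cast]; exact hlcp i (i+l) hi hiln'
    set k := pvLcpN cs i (i+l) with hk
    have c4 : (↑i + (↑k : Int)) = ↑(i + k) := by push_cast; ring
    have c5 : (↑i + ↑l + (↑k : Int)) = ↑(i + l + k) := by push_cast; ring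
    have hcond : ((↑i + 2 * ↑l : Int) > PySem.List.len cs ∨ pvGet2 lcp ↑i (↑i + ↑l) ≥ (↑l : Int) ∨
        pvGetc cs (↑i + pvGet2 lcp ↑i (↑i + ↑l)) < pvGetc cs (↑i + ↑l + pvGet2 lcp ↑i (↑i + ↑l))) ↔
        (cs.length < i + 2*l ∨ l ≤ k ∨ cs.getD (i+k) ' ' < cs.getD (i+l+k) ' ') := by
      rw [hlcpv, c4, c5, pvGetc_cast, pvGetc_cast]
      apply or_congr
      · simp only [PySem.List.len_eq, gt_iff_lt]; omega
      · apply or_congr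
        · simp only [ge_iff_le]; exact_mod_cast Iff.rfl
        · exact Iff.rfl
    rw [if_congr hcond rfl rfl]
    have hT : ∀ (l'' : Nat), l'' ≤ cs.length → pvG t1 (i+l) l'' = pvDpF cs (i+l) l'' := by
      intro l'' hle
      rw [ht1un (i+l) l'' (Or.inl (by omega))]
      exact habove (i+l) l'' (by omega) hiln' hle
    set T : Int := if (cs.length < i + 2*l ∨ l ≤ k ∨ cs.getD (i+k) ' ' < cs.getD (i+l+k) ' ')
      then pvDpF cs (i+l) l else pvDpF cs (i+l) (l+1) with hTdef
    have hmain : (if (cs.length < i + 2*l ∨ l ≤ k ∨ cs.getD (i+k) ' ' < cs.getD (i+l+k) ' ')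
        then pvSet2 t1 ↑i ↑l (pvGet2 t1 ↑i ↑l + pvGet2 t1 (↑i + ↑l) ↑l)
        else pvSet2 t1 ↑i ↑l (pvGet2 t1 ↑i ↑l + pvGet2 t1 (↑i + ↑l) (↑l + 1)))
        = t1.set i ((t1.getD i []).set l (b + T)) := by
      split_ifs with hca
      · rw [c1, pvSet2_cast, pvGet2_cast, pvGet2_cast, ht1il, hT l (by omega), hTdef, if_pos hca]
      · rw [c1, c2, pvSet2_cast, pvGet2_cast, pvGet2_cast, ht1il, hT (l+1) (by omega), hTdef, if_neg hca]
    rw [hmain]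
    set t2 : List (List Int) := t1.set i ((t1.getD i []).set l (b + T)) with ht2
    have hlen2 : pvLens cs t2 (cs.length + 1) := pvLens_set2 cs t1 _ i l _ hi hlen1
    rw [pvSet2_cast, pvGet2_cast]
    have ht2il : pvG t2 i l = b + T := by rw [ht2]; exact hg2e t1 l _ hlen1 (by omega)
    rw [ht2il]
    refine ⟨pvLens_set2 cs t2 _ i l _ hi hlen2, ?_, ?_⟩
    · intro i' l' hne
      rw [pvG_set2_ne _ _ _ _ _ _ hne, ht2, pvG_set2_ne _ _ _ _ _ _ hne, ht1un i' l' hne]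
    · rw [hg2e t2 l _ hlen2 (by omega)]
      rw [pvDpF, dif_neg (by simp only [not_or, not_le, not_lt]; exact ⟨by omega, hc0, by omega, by omega⟩),
        if_neg hiln, hTdef, hb]
      by_cases hln : l < cs.length
      · rw [dif_pos hln, if_pos hln]
      · rw [dif_neg hln, if_neg hln]

theorem dpRow (cs : List Char) (lcp : List (List Int)) (i : Nat)
    (hlcp : ∀ a b, a < cs.length → b < cs.length → pvG lcp a b = ↑(pvLcpN cs a b))
    (hi : i < cs.length) (hc0 : ¬ cs.getD i ' ' = '0') :
    ∀ (l0 : Nat), l0 ≤ cs.length - i → ∀ t : List (List Int), pvLens cs t (cs.length + 1) →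
    (∀ i' l', i < i' → i' < cs.length → l' ≤ cs.length → pvG t i' l' = pvDpF cs i' l') →
    (∀ l', l0 < l' → l' ≤ cs.length → pvG t i l' = pvDpF cs i l') →
    (∀ l', l' ≤ l0 → pvG t i l' = 0) →
    pvLens cs ((PySem.List.pyRange (↑l0) 0 (-1)).foldl (pvDpInner cs lcp ↑i) t) (cs.length + 1) ∧
    (∀ i' l', i' ≠ i →
      pvG ((PySem.List.pyRange (↑l0) 0 (-1)).foldl (pvDpInner cs lcp ↑i) t) i' l' = pvG t i' l') ∧
    (∀ l', 1 ≤ l' → l' ≤ l0 →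
      pvG ((PySem.List.pyRange (↑l0) 0 (-1)).foldl (pvDpInner cs lcp ↑i) t) i l' = pvDpF cs i l') ∧
    (∀ l', l0 < l' →
      pvG ((PySem.List.pyRange (↑l0) 0 (-1)).foldl (pvDpInner cs lcp ↑i) t) i l' = pvG t i l') ∧
    (pvG ((PySem.List.pyRange (↑l0) 0 (-1)).foldl (pvDpInner cs lcp ↑i) t) i 0 = pvG t i 0) := by
  intro l0
  induction l0 with
  | zero =>
    intro _ t hl _ _ _
    rw [Nat.cast_zero, PySem.List.pyRange_neg_one_eq_nil le_rfl]
    exact ⟨hl, fun _ _ _ => rfl, fun _ h1 h2 => absurd (Nat.le_trans h1 h2) (by omega),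
      fun _ _ => rfl, rfl⟩
  | succ l0 ih =>
    intro hl0 t hl habove hhi hlo
    rw [PySem.List.pyRange_neg_one_cons (show (0:Int) < ↑(l0+1) by omega), List.foldl_cons,
      show ((↑(l0+1):Int)) - 1 = ↑l0 by push_cast; ring]
    obtain ⟨el, eun, eval⟩ := dpInner_effect cs lcp t i (l0+1) hlcp hi hc0 (by omega) (by omega)
      hl habove (fun l' h1 h2 => hhi l' (by omega) h2) (fun l' h1 => hlo l' (by omega))
    obtain ⟨rl, run, rlow, rhigh, rzero⟩ := ih (by omega) (pvDpInner cs lcp ↑i t ↑(l0+1)) el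
      (fun i' l' h1 h2 h3 => by rw [eun i' l' (Or.inl (by omega))]; exact habove i' l' h1 h2 h3)
      (fun l' h1 h2 => by
        by_cases he : l' = l0 + 1
        · subst he; exact eval
        · rw [eun i l' (Or.inr he)]; exact hhi l' (by omega) h2)
      (fun l' h1 => by rw [eun i l' (Or.inr (by omega))]; exact hlo l' (by omega))
    refine ⟨rl, ?_, ?_, ?_, ?_⟩
    · intro i' l' hne
      rw [run i' l' hne, eun i' l' (Or.inl hne)]
    · intro l' h1 h2
      by_cases he : l' ≤ l0
      · exact rlow l' h1 he
      · have he2 : l' = l0 + 1 := by omega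
        rw [he2, rhigh (l0+1) (by omega), eval]
    · intro l' h1
      rw [rhigh l' (by omega), eun i l' (Or.inr (by omega))]
    · rw [rzero, eun i 0 (Or.inr (by omega))]

theorem dpOuter (cs : List Char) (lcp : List (List Int))
    (hlcp : ∀ a b, a < cs.length → b < cs.length → pvG lcp a b = ↑(pvLcpN cs a b)) :
    ∀ (i0 : Nat), i0 ≤ cs.length → ∀ t : List (List Int), pvLens cs t (cs.length + 1) →
    (∀ i' l', i0 ≤ i' → i' < cs.length → l' ≤ cs.length → pvG t i' l' = pvDpF cs i' l') →
    (∀ i' l', i' < i0 → pvG t i' l' = 0) →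
    pvLens cs ((PySem.List.pyRange (↑i0 - 1) (-1) (-1)).foldl
      (fun t i => if pvGetc cs i = '0' then t
        else (PySem.List.pyRange ((PySem.List.len cs) - i) 0 (-1)).foldl (pvDpInner cs lcp i) t) t)
      (cs.length + 1) ∧
    (∀ i' l', i' < cs.length → l' ≤ cs.length →
      pvG ((PySem.List.pyRange (↑i0 - 1) (-1) (-1)).foldl
        (fun t i => if pvGetc cs i = '0' then t
          else (PySem.List.pyRange ((PySem.List.len cs) - i) 0 (-1)).foldl (pvDpInner cs lcp i) t) t) i' l'
        = pvDpF cs i' l') := by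
  intro i0
  induction i0 with
  | zero =>
    intro _ t hl habove _
    rw [show ((0:Nat):Int) - 1 = -1 by norm_num, PySem.List.pyRange_neg_one_eq_nil le_rfl]
    exact ⟨hl, fun i' l' h1 h2 => habove i' l' (by omega) h1 h2⟩
  | succ i0 ih =>
    intro hi0 t hl habove hbelow
    rw [show ((↑(i0+1):Int)) - 1 = ↑i0 by push_cast; ring,
      PySem.List.pyRange_neg_one_cons (show (-1:Int) < (i0:Int) by omega), List.foldl_cons]
    have hi : i0 < cs.length := by omega
    by_cases hc0 : pvGetc cs ↑i0 = '0'
    · rw [if_pos hc0]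
      apply ih (by omega) t hl
      · intro i' l' h1 h2 h3
        by_cases he : i' = i0
        · subst he
          rw [hbelow i' l' (by omega)]
          rw [pvDpF, dif_pos (Or.inr (Or.inl (by rw [← pvGetc_cast]; exact hc0)))]
        · exact habove i' l' (by omega) h2 h3
      · intro i' l' h1; exact hbelow i' l' (by omega)
    · rw [if_neg hc0]
      have hc0' : ¬ cs.getD i0 ' ' = '0' := by rw [← pvGetc_cast]; exact hc0
      have hrng : (PySem.List.len cs) - (↑i0 : Int) = ↑(cs.length - i0) := by
        simp only [PySem.List.len_eq]; omega
      rw [hrng]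
      obtain ⟨rl, run, rlow, rhigh, rzero⟩ := dpRow cs lcp i0 hlcp hi hc0' (cs.length - i0) le_rfl t hl
        (fun i' l' h1 h2 h3 => habove i' l' (by omega) h2 h3)
        (fun l' h1 h2 => by
          rw [hbelow i0 l' (by omega)]
          rw [pvDpF, dif_pos (Or.inr (Or.inr (Or.inr (by omega))))])
        (fun l' h1 => hbelow i0 l' (by omega))
      apply ih (by omega) _ rl
      · intro i' l' h1 h2 h3
        by_cases he : i' = i0
        · subst he
          by_cases hz : l' = 0
          · subst hz
            rw [rzero, hbelow i' 0 (by omega), pvDpF, dif_pos (Or.inr (Or.inr (Or.inl (by omega))))]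
          · by_cases hbig : l' ≤ cs.length - i'
            · exact rlow l' (by omega) hbig
            · rw [rhigh l' (by omega), hbelow i' l' (by omega),
                pvDpF, dif_pos (Or.inr (Or.inr (Or.inr (by omega))))]
        · rw [run i' l' he]
          exact habove i' l' (by omega) h2 h3
      · intro i' l' h1
        rw [run i' l' (by omega)]
        exact hbelow i' l' (by omega)

def pvSufF (cs : List Char) (i l : Nat) : Int :=
  if h : cs.length ≤ i ∨ cs.getD i ' ' = '0' ∨ l < 1 ∨ cs.length - i < l then 0
  else
    PySem.Int.mod
      ((if hb : l < cs.length - i then pvSufF cs i (l+1) else 0) +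
       (if i + l = cs.length then 1
        else if pvLexLe ((cs.drop i).take l) ((cs.drop (i+l)).take l) then
          (if l < cs.length - (i+l) + 2 then pvSufF cs (i+l) l else 0)
        else
          (if l + 1 < cs.length - (i+l) + 2 then pvSufF cs (i+l) (l+1) else 0))) pvM
termination_by (cs.length - i) * (cs.length + 1) + (cs.length - l)
decreasing_by
  all_goals push_neg at h
  · omega
  all_goals
    (have h1 : cs.length - (i + l) ≤ cs.length - i - 1 := by omega
     have h2 : (cs.length - (i+l)) * (cs.length + 1) ≤ (cs.length - i - 1) * (cs.length + 1) :=
       Nat.mul_le_mul_right _ h1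
     have h3 : (cs.length - i - 1) * (cs.length + 1) + (cs.length + 1) = (cs.length - i) * (cs.length + 1) := by
       have hh : cs.length - i - 1 + 1 = cs.length - i := by omega
       calc (cs.length - i - 1) * (cs.length + 1) + (cs.length + 1)
           = (cs.length - i - 1 + 1) * (cs.length + 1) := by ring
         _ = (cs.length - i) * (cs.length + 1) := by rw [hh]
     omega)

-- the value appended for block length l at start i (B's `exact` entry), in Nat form

def pvEF (cs : List Char) (i l : Nat) : Int :=
  if i + l = cs.length then 1
  else if pvLexLe ((cs.drop i).take l) ((cs.drop (i+l)).take l) then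
    (if l < cs.length - (i+l) + 2 then pvSufF cs (i+l) l else 0)
  else
    (if l + 1 < cs.length - (i+l) + 2 then pvSufF cs (i+l) (l+1) else 0)

def pvRowOK (cs : List Char) (i : Nat) (r : List Int) : Prop :=
  r.length = cs.length - i + 2 ∧ ∀ l : Nat, r.getD l 0 = pvSufF cs i l

theorem pvExactB_eq (cs : List Char) (rows : List (Option (List Int))) (i l : Nat)
    (hrows : ∀ i', i < i' → i' < cs.length →
      ∃ r, rows.getD i' none = some r ∧ pvRowOK cs i' r)
    (hi : i < cs.length) (hl1 : 1 ≤ l) (hl2 : l ≤ cs.length - i) :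
    pvExactB cs rows ↑i ↑l = pvEF cs i l := by
  have c1 : (↑i + ↑l : Int) = ↑(i + l) := by push_cast; ring
  simp only [pvExactB, pvEF, c1, PySem.List.len_eq]
  by_cases hn : i + l = cs.length
  · rw [if_pos (by exact_mod_cast congrArg (Nat.cast : Nat → Int) hn), if_pos hn]
  · rw [if_neg (by intro hc; exact hn (by exact_mod_cast hc)), if_neg hn]
    have hiln : i + l < cs.length := by omega
    obtain ⟨r, hr, hok⟩ := hrows (i+l) (by omega) hiln
    obtain ⟨hrl, hrv⟩ := hok
    have hsl1 : PySem.List.slice cs (some (↑i : Int)) (some (↑(i+l) : Int)) = (cs.drop i).take l := by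
      rw [PySem.List.slice_natCast]
      congr 1
      omega
    have hsl2 : PySem.List.slice cs (some (↑(i+l) : Int)) (some ((↑(i+l) : Int) + ↑l)) = (cs.drop (i+l)).take l := by
      rw [show ((↑(i+l) : Int) + ↑l) = ↑(i + l + l) by push_cast; ring, PySem.List.slice_natCast]
      congr 1
      omega
    have hget : PySem.List.pyGetD rows (↑(i+l) : Int) none = some r := by
      rw [PySem.List.pyGetD_natCast]; exact hr
    rw [hsl1, hsl2, hget]
    have hat : ∀ k : Nat, pvAt (some r) ↑k = if k < cs.length - (i+l) + 2 then pvSufF cs (i+l) k else 0 := by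
      intro k
      simp only [pvAt, PySem.List.len_eq, PySem.List.pyGetD_natCast]
      by_cases hk : k < cs.length - (i+l) + 2
      · rw [if_pos (by rw [← hrl] at hk; exact_mod_cast hk), if_pos hk, hrv]
      · rw [if_neg (by rw [← hrl] at hk; exact_mod_cast hk), if_neg hk]
    by_cases hlex : pvLexLe (List.take l (List.drop i cs)) (List.take l (List.drop (i+l) cs)) = true
    · rw [if_pos hlex, if_pos hlex, hat l]
    · rw [if_neg hlex, if_neg hlex, show ((↑l : Int) + 1) = ↑(l+1) by push_cast; ring, hat (l+1)]

theorem pv_getD_replicate_zero (a l : Nat) : (List.replicate a (0:Int)).getD l 0 = 0 := by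
  by_cases h : l < a
  · rw [List.getD_eq_getElem?_getD]; simp [List.getElem?_replicate, h]
  · rw [List.getD_eq_default _ _ (by simp; omega)]

theorem sufRow (cs : List Char) (i : Nat) (exact : List Int)
    (hi : i < cs.length) (hc0 : ¬ cs.getD i ' ' = '0')
    (hex : ∀ l', 1 ≤ l' → l' ≤ cs.length - i →
      PySem.List.pyGetD exact ((↑l' : Int) - 1) 0 = pvEF cs i l') :
    ∀ (l0 : Nat), l0 ≤ cs.length - i → ∀ row : List Int, row.length = cs.length - i + 2 →
    (∀ l', l0 < l' → row.getD l' 0 = pvSufF cs i l') →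
    (∀ l', l' ≤ l0 → row.getD l' 0 = 0) →
    ((PySem.List.pyRange (↑l0) 0 (-1)).foldl
      (fun row l => PySem.List.pySetD row l
        (PySem.Int.mod (PySem.List.pyGetD row (l + 1) 0 + PySem.List.pyGetD exact (l - 1) 0) pvM))
      row).length = cs.length - i + 2 ∧
    (∀ l' : Nat, ((PySem.List.pyRange (↑l0) 0 (-1)).foldl
      (fun row l => PySem.List.pySetD row l
        (PySem.Int.mod (PySem.List.pyGetD row (l + 1) 0 + PySem.List.pyGetD exact (l - 1) 0) pvM))
      row).getD l' 0 = if 1 ≤ l' ∧ l' ≤ l0 then pvSufF cs i l' else row.getD l' 0) := by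
  intro l0
  induction l0 with
  | zero =>
    intro _ row hlen _ _
    rw [Nat.cast_zero, PySem.List.pyRange_neg_one_eq_nil le_rfl]
    exact ⟨by rw [List.foldl_nil]; exact hlen, fun l' => by rw [List.foldl_nil, if_neg (by omega)]⟩
  | succ l0 ih =>
    intro hl0 row hlen hhi hlo
    rw [PySem.List.pyRange_neg_one_cons (show (0:Int) < ↑(l0+1) by omega), List.foldl_cons,
      show ((↑(l0+1):Int)) - 1 = ↑l0 by push_cast; ring]
    have c2 : ((↑(l0+1) : Int) + 1) = ↑(l0+2) := by push_cast; ring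
    have hex' := hex (l0+1) (by omega) (by omega)
    rw [show ((↑(l0+1) : Int) - 1) = ↑l0 by push_cast; ring] at hex'
    set v : Int := PySem.Int.mod (PySem.List.pyGetD row ((↑(l0+1) : Int) + 1) 0 +
      PySem.List.pyGetD exact (↑l0 : Int) 0) pvM with hv
    have hbody : PySem.List.pySetD row (↑(l0+1) : Int) v = row.set (l0+1) v := by
      rw [PySem.List.pySetD_natCast]
    have hvval : v = pvSufF cs i (l0+1) := by
      rw [hv, c2, PySem.List.pyGetD_natCast, hex']
      have hup : row.getD (l0+2) 0 = pvSufF cs i (l0+2) := hhi (l0+2) (by omega)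
      rw [hup]
      rw [show pvSufF cs i (l0+1) = PySem.Int.mod
        ((if hb : l0+1 < cs.length - i then pvSufF cs i (l0+2) else 0) +
         (if i + (l0+1) = cs.length then 1
          else if pvLexLe ((cs.drop i).take (l0+1)) ((cs.drop (i+(l0+1))).take (l0+1)) then
            (if l0+1 < cs.length - (i+(l0+1)) + 2 then pvSufF cs (i+(l0+1)) (l0+1) else 0)
          else
            (if l0+1 + 1 < cs.length - (i+(l0+1)) + 2 then pvSufF cs (i+(l0+1)) (l0+2) else 0))) pvM
        from by rw [pvSufF, dif_neg (by { simp only [not_or, not_le, not_lt]; exact ⟨by omega, hc0, by omega, by omega⟩ })]]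
      congr 1
      rw [pvEF]
      by_cases hb : l0 + 1 < cs.length - i
      · rw [dif_pos hb]
      · rw [dif_neg hb]
        have : pvSufF cs i (l0+2) = 0 := by
          rw [pvSufF, dif_pos (Or.inr (Or.inr (Or.inr (by omega))))]
        rw [this]
    rw [hbody]
    obtain ⟨rl, rv⟩ := ih (by omega) (row.set (l0+1) v) (by simp [hlen])
      (fun l' h1 => by
        by_cases he : l' = l0+1
        · subst he; rw [pv_getD_set_eq _ _ _ _ (by omega), hvval]
        · rw [pv_getD_set_ne _ _ _ _ _ he]; exact hhi l' (by omega))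
      (fun l' h1 => by
        rw [pv_getD_set_ne _ _ _ _ _ (by omega)]; exact hlo l' (by omega))
    refine ⟨rl, ?_⟩
    intro l'
    rw [rv l']
    by_cases h1 : 1 ≤ l' ∧ l' ≤ l0
    · rw [if_pos h1, if_pos (by omega)]
    · rw [if_neg h1]
      by_cases he : l' = l0+1
      · subst he
        rw [if_pos (by omega), pv_getD_set_eq _ _ _ _ (by omega), hvval]
      · rw [if_neg (by omega), pv_getD_set_ne _ _ _ _ _ he]

theorem pvRowB_effect (cs : List Char) (rows : List (Option (List Int))) (i0 : Nat)
    (hi : i0 < cs.length) (hlen : rows.length = cs.length)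
    (hrows : ∀ i', i0 < i' → i' < cs.length →
      ∃ r, rows.getD i' none = some r ∧ pvRowOK cs i' r) :
    (pvRowB cs rows ↑i0).length = cs.length ∧
    (∀ i', i' ≠ i0 → (pvRowB cs rows ↑i0).getD i' none = rows.getD i' none) ∧
    (∃ r, (pvRowB cs rows ↑i0).getD i0 none = some r ∧ pvRowOK cs i0 r) := by
  have hm : (PySem.List.len cs - (↑i0 : Int)) = ↑(cs.length - i0) := by
    simp only [PySem.List.len_eq]; omega
  have ht : ((↑(cs.length - i0) : Int) + 2).toNat = cs.length - i0 + 2 := by omega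
  simp only [pvRowB, hm, ht]
  by_cases hc0 : pvGetc cs ↑i0 = '0'
  · have hc0' : cs.getD i0 ' ' = '0' := by rw [← pvGetc_cast]; exact hc0
    rw [if_pos hc0, PySem.List.pySetD_natCast]
    refine ⟨by simp [hlen], fun i' hne => pv_getD_set_ne _ _ _ _ _ hne, ?_⟩
    refine ⟨_, pv_getD_set_eq _ _ _ _ (by omega), by simp, ?_⟩
    intro l
    rw [pv_getD_replicate_zero, pvSufF, dif_pos (Or.inr (Or.inl hc0'))]
  · have hc0' : ¬ cs.getD i0 ' ' = '0' := by rw [← pvGetc_cast]; exact hc0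
    rw [if_neg hc0]
    have hexact : (PySem.List.pyRange 1 ((↑(cs.length - i0) : Int) + 1) 1).foldl
        (fun ex l => ex ++ [pvExactB cs rows ↑i0 l]) []
        = (PySem.List.pyRange 1 ((↑(cs.length - i0) : Int) + 1) 1).map (pvExactB cs rows ↑i0) := by
      rw [PySem.List.foldl_append_singleton_eq_map]
      simp
    rw [hexact]
    have hex : ∀ l', 1 ≤ l' → l' ≤ cs.length - i0 →
        PySem.List.pyGetD ((PySem.List.pyRange 1 ((↑(cs.length - i0) : Int) + 1) 1).map
          (pvExactB cs rows ↑i0)) ((↑l' : Int) - 1) 0 = pvEF cs i0 l' := by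
      intro l' h1 h2
      rw [show ((↑l' : Int) - 1) = ↑(l' - 1) by omega]
      rw [PySem.List.pyGetD_map_pyRange_one (pvExactB cs rows ↑i0) 1 ((↑(cs.length - i0) : Int) + 1)
        (l' - 1) 0 (by omega)]
      rw [show ((1 : Int) + ↑(l' - 1)) = ↑l' by omega]
      exact pvExactB_eq cs rows i0 l' hrows hi h1 h2
    obtain ⟨rl, rv⟩ := sufRow cs i0 _ hi hc0' hex (cs.length - i0) le_rfl
      (List.replicate (cs.length - i0 + 2) 0) (by simp)
      (fun l' h1 => by
        rw [pv_getD_replicate_zero, pvSufF, dif_pos (Or.inr (Or.inr (Or.inr (by omega))))])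
      (fun l' h1 => pv_getD_replicate_zero _ _)
    rw [PySem.List.pySetD_natCast]
    refine ⟨by simp [hlen], fun i' hne => pv_getD_set_ne _ _ _ _ _ hne, ?_⟩
    refine ⟨_, pv_getD_set_eq _ _ _ _ (by omega), rl, ?_⟩
    intro l
    rw [rv l]
    by_cases h1 : 1 ≤ l ∧ l ≤ cs.length - i0
    · rw [if_pos h1]
    · rw [if_neg h1, pv_getD_replicate_zero]
      by_cases hz : l = 0
      · subst hz; rw [pvSufF, dif_pos (Or.inr (Or.inr (Or.inl (by omega))))]
      · rw [pvSufF, dif_pos (Or.inr (Or.inr (Or.inr (by omega))))]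

theorem rowsBOuter (cs : List Char) :
    ∀ (i0 : Nat), i0 ≤ cs.length → ∀ rows : List (Option (List Int)),
    rows.length = cs.length →
    (∀ i', i0 ≤ i' → i' < cs.length →
      ∃ r, rows.getD i' none = some r ∧ pvRowOK cs i' r) →
    ((PySem.List.pyRange (↑i0 - 1) (-1) (-1)).foldl (pvRowB cs) rows).length = cs.length ∧
    (∀ i', i' < cs.length →
      ∃ r, ((PySem.List.pyRange (↑i0 - 1) (-1) (-1)).foldl (pvRowB cs) rows).getD i' none = some r ∧
        pvRowOK cs i' r) := by
  intro i0
  induction i0 with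
  | zero =>
    intro _ rows hlen hrows
    rw [show ((0:Nat):Int) - 1 = -1 by norm_num, PySem.List.pyRange_neg_one_eq_nil le_rfl]
    exact ⟨hlen, fun i' h => hrows i' (by omega) h⟩
  | succ i0 ih =>
    intro hi0 rows hlen hrows
    rw [show ((↑(i0+1):Int)) - 1 = ↑i0 by push_cast; ring,
      PySem.List.pyRange_neg_one_cons (show (-1:Int) < (i0:Int) by omega), List.foldl_cons]
    obtain ⟨el, eun, er⟩ := pvRowB_effect cs rows i0 (by omega) hlen
      (fun i' h1 h2 => hrows i' (by omega) h2)
    apply ih (by omega) _ el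
    intro i' h1 h2
    by_cases he : i' = i0
    · subst he; exact er
    · rw [eun i' he]
      exact hrows i' (by omega) h2

theorem pvRowsB_spec (cs : List Char) :
    ∀ i, i < cs.length →
      ∃ r, (pvRowsB cs).getD i none = some r ∧ pvRowOK cs i r := by
  intro i hi
  have hrw : pvRowsB cs = (PySem.List.pyRange ((cs.length : Int) - 1) (-1) (-1)).foldl (pvRowB cs)
      (List.replicate cs.length none) := by
    simp only [pvRowsB, PySem.List.len_eq]
  rw [hrw]
  have h := rowsBOuter cs cs.length le_rfl (List.replicate cs.length none) (by simp)
    (fun i' h1 h2 => absurd h1 (by omega))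
  exact h.2 i hi

theorem pvLexLe_iff_lcp (cs : List Char) :
    ∀ (l i j : Nat), i + l ≤ cs.length → j + l ≤ cs.length →
    (pvLexLe ((cs.drop i).take l) ((cs.drop j).take l) = true ↔
      (l ≤ pvLcpN cs i j ∨
        cs.getD (i + pvLcpN cs i j) ' ' < cs.getD (j + pvLcpN cs i j) ' ')) := by
  intro l
  induction l with
  | zero => intro i j hi hj; simp [pvLexLe]
  | succ l ih =>
    intro i j hi hj
    have hi' : i < cs.length := by omega
    have hj' : j < cs.length := by omega
    rw [List.drop_eq_getElem_cons hi', List.drop_eq_getElem_cons hj']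
    simp only [List.take_succ_cons]
    rw [pvLcpN]
    have hgi : cs.getD i ' ' = cs[i] := List.getD_eq_getElem cs ' ' hi'
    have hgj : cs.getD j ' ' = cs[j] := List.getD_eq_getElem cs ' ' hj'
    by_cases hc : cs[i] = cs[j]
    · -- equal heads
      rw [if_neg (by rw [hgi, hgj, hc]; simp)]
      simp only [pvLexLe, hc, lt_irrefl, if_false]
      by_cases hb : i + 1 < cs.length ∧ j + 1 < cs.length
      · rw [dif_pos hb]
        have this1 := ih (i+1) (j+1) (by omega) (by omega)
        have e1 : i + (1 + pvLcpN cs (i+1) (j+1)) = (i+1) + pvLcpN cs (i+1) (j+1) := by omega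
        have e2 : j + (1 + pvLcpN cs (i+1) (j+1)) = (j+1) + pvLcpN cs (i+1) (j+1) := by omega
        have hn : l + 1 ≤ 1 + pvLcpN cs (i+1) (j+1) ↔ l ≤ pvLcpN cs (i+1) (j+1) := by omega
        rw [e1, e2, hn, this1]
      · rw [dif_neg hb]
        have hl0 : l = 0 := by omega
        subst hl0
        simp [pvLexLe]
    · -- differing heads
      rw [if_pos (by rw [hgi, hgj]; exact hc)]
      simp only [pvLexLe, Nat.add_zero]
      rw [hgi, hgj]
      rcases lt_trichotomy cs[i] cs[j] with hlt | heq | hgt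
      · rw [if_pos hlt]
        exact ⟨fun _ => Or.inr hlt, fun _ => by trivial⟩
      · exact absurd heq hc
      · rw [if_neg (asymm hgt), if_pos hgt]
        constructor
        · intro h; exact absurd h (by simp)
        · intro h
          rcases h with h1 | h2
          · exact absurd h1 (by omega)
          · exact absurd h2 (asymm hgt)

theorem pvMod1 : PySem.Int.mod 1 pvM = 1 := by
  rw [PySem.Int.mod_eq_emod_of_pos (by norm_num [pvM])]
  norm_num [pvM]

theorem pvDpF_eq_pvSufF (cs : List Char) :
    ∀ (μ i l : Nat), (cs.length - i) * (cs.length + 1) + (cs.length - l) ≤ μ →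
    pvDpF cs i l = pvSufF cs i l := by
  intro μ
  induction μ with
  | zero =>
    intro i l hμ
    by_cases hg : cs.length ≤ i ∨ cs.getD i ' ' = '0' ∨ l < 1 ∨ cs.length - i < l
    · rw [pvDpF, dif_pos hg, pvSufF, dif_pos hg]
    · exfalso
      simp only [not_or, not_le, not_lt] at hg
      have : 1 * (cs.length + 1) ≤ (cs.length - i) * (cs.length + 1) :=
        Nat.mul_le_mul_right _ (by omega)
      omega
  | succ μ ih =>
    intro i l hμ
    by_cases hg : cs.length ≤ i ∨ cs.getD i ' ' = '0' ∨ l < 1 ∨ cs.length - i < l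
    · rw [pvDpF, dif_pos hg, pvSufF, dif_pos hg]
    · have hg' := hg
      simp only [not_or, not_le, not_lt] at hg'
      obtain ⟨hi, hc0, hl1, hl2⟩ := hg'
      rw [pvDpF, dif_neg hg, pvSufF, dif_neg hg]
      have hbase : (if _hl : l < cs.length then pvDpF cs i (l+1) else 0)
          = (if _hb : l < cs.length - i then pvSufF cs i (l+1) else 0) := by
        by_cases hb : l < cs.length - i
        · rw [dif_pos hb, dif_pos (by omega)]
          exact ih i (l+1) (by omega)
        · rw [dif_neg hb]
          by_cases hl : l < cs.length
          · rw [dif_pos hl, pvDpF, dif_pos (Or.inr (Or.inr (Or.inr (by omega))))]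
          · rw [dif_neg hl]
      by_cases hiln : i + l = cs.length
      · rw [if_pos hiln]
        have hb1 : (if _hl : l < cs.length then pvDpF cs i (l+1) else 0) = 0 := by
          by_cases hl : l < cs.length
          · rw [dif_pos hl, pvDpF, dif_pos (Or.inr (Or.inr (Or.inr (by omega))))]
          · rw [dif_neg hl]
        have hb2 : (if _hb : l < cs.length - i then pvSufF cs i (l+1) else 0) = 0 := by
          rw [dif_neg (by omega)]
        rw [hb1, hb2, if_pos hiln, zero_add, pvMod1]
      · rw [if_neg hiln, if_neg hiln]
        have hiln' : i + l < cs.length := by omega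
        have m1 : cs.length - (i+l) ≤ cs.length - i - 1 := by omega
        have m2 : (cs.length - (i+l)) * (cs.length + 1) ≤ (cs.length - i - 1) * (cs.length + 1) :=
          Nat.mul_le_mul_right _ m1
        have m3 : (cs.length - i - 1) * (cs.length + 1) + (cs.length + 1)
            = (cs.length - i) * (cs.length + 1) := by
          have hh : cs.length - i - 1 + 1 = cs.length - i := by omega
          calc (cs.length - i - 1) * (cs.length + 1) + (cs.length + 1)
              = (cs.length - i - 1 + 1) * (cs.length + 1) := by ring
            _ = (cs.length - i) * (cs.length + 1) := by rw [hh]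
        congr 1
        rw [hbase]
        congr 1
        by_cases hbig : cs.length < i + 2*l
        · have hT0 : pvDpF cs (i+l) l = 0 := by
            rw [pvDpF, dif_pos (Or.inr (Or.inr (Or.inr (by omega))))]
          rw [if_pos (Or.inl hbig), hT0]
          split_ifs with h1 h2 h3
          · rw [pvSufF, dif_pos (Or.inr (Or.inr (Or.inr (by omega))))]
          · rfl
          · rw [pvSufF, dif_pos (Or.inr (Or.inr (Or.inr (by omega))))]
          · rfl
        · have hle2 : (i+l) + l ≤ cs.length := by omega
          have hiff := pvLexLe_iff_lcp cs l i (i+l) (by omega) hle2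
          by_cases hlex : pvLexLe ((cs.drop i).take l) ((cs.drop (i+l)).take l) = true
          · have hcond : (cs.length < i + 2*l ∨ l ≤ pvLcpN cs i (i+l) ∨
                cs.getD (i + pvLcpN cs i (i+l)) ' ' < cs.getD (i+l + pvLcpN cs i (i+l)) ' ') := by
              rcases hiff.mp hlex with h | h
              · exact Or.inr (Or.inl h)
              · exact Or.inr (Or.inr h)
            rw [if_pos hcond, if_pos hlex, if_pos (show l < cs.length - (i+l) + 2 by omega)]
            exact ih (i+l) l (by omega)
          · have hcond : ¬(cs.length < i + 2*l ∨ l ≤ pvLcpN cs i (i+l) ∨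
                cs.getD (i + pvLcpN cs i (i+l)) ' ' < cs.getD (i+l + pvLcpN cs i (i+l)) ' ') := by
              intro h
              rcases h with h | h
              · omega
              · exact hlex (hiff.mpr h)
            rw [if_neg hcond, if_neg hlex, if_pos (show l+1 < cs.length - (i+l) + 2 by omega)]
            exact ih (i+l) (l+1) (by omega)

theorem pvG_zero_init (a b i l : Nat) :
    pvG (List.replicate a (List.replicate b (0:Int))) i l = 0 := by
  unfold pvG
  by_cases h : i < a
  · have hrow : (List.replicate a (List.replicate b (0:Int))).getD i [] = List.replicate b 0 := by
      rw [List.getD_eq_getElem?_getD]; simp [List.getElem?_replicate, h]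
    rw [hrow, pv_getD_replicate_zero]
  · rw [List.getD_eq_default (List.replicate a (List.replicate b (0:Int))) _ (by simp; omega)]
    simp

theorem pvDpTable_spec (cs : List Char) :
    ∀ i l : Nat, i < cs.length → l ≤ cs.length →
      pvG (pvDpTable cs (pvLcpTable cs)) i l = pvDpF cs i l := by
  intro i l hi hl
  obtain ⟨_, hsp⟩ := pvLcpTable_spec cs
  have hrw : pvDpTable cs (pvLcpTable cs)
      = (PySem.List.pyRange ((cs.length : Int) - 1) (-1) (-1)).foldl
        (fun t i => if pvGetc cs i = '0' then t
          else (PySem.List.pyRange ((PySem.List.len cs) - i) 0 (-1)).foldl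
            (pvDpInner cs (pvLcpTable cs) i) t)
        (List.replicate cs.length (List.replicate (cs.length + 1) 0)) := by
    simp only [pvDpTable, PySem.List.len_eq]
  rw [hrw]
  have hinit : pvLens cs (List.replicate cs.length (List.replicate (cs.length + 1) (0:Int)))
      (cs.length + 1) := by
    constructor
    · simp
    · intro r hr
      rw [List.getD_eq_getElem?_getD]
      simp [List.getElem?_replicate, hr]
  have h := dpOuter cs (pvLcpTable cs) hsp cs.length le_rfl _ hinit
    (fun i' l' h1 h2 _ => absurd h1 (by omega))
    (fun i' l' _ => pvG_zero_init _ _ _ _)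
  exact h.2 i l hi hl

theorem pv_main (num : String) (h : num ≠ "") :
    numberOfCombinations num = numberOfCombinations_alt num := by
  have hne : num.toList ≠ [] := by simpa using h
  have hn : 0 < num.toList.length := List.length_pos_iff.mpr hne
  have hA : numberOfCombinations num = pvDpF num.toList 0 1 := by
    unfold numberOfCombinations
    rw [show (0:Int) = ((0:Nat):Int) by norm_num, show (1:Int) = ((1:Nat):Int) by norm_num,
      pvGet2_cast]
    exact pvDpTable_spec num.toList 0 1 hn (by omega)
  obtain ⟨r, hr, hok⟩ := pvRowsB_spec num.toList 0 hn
  have hB : numberOfCombinations_alt num = pvSufF num.toList 0 1 := by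
    unfold numberOfCombinations_alt
    rw [PySem.List.pyGetD_zero, hr]
    rw [show (1:Int) = ((1:Nat):Int) by norm_num]
    change PySem.List.pyGetD r (((1:Nat)):Int) 0 = pvSufF num.toList 0 1
    rw [PySem.List.pyGetD_natCast]
    exact hok.2 1
  rw [hA, hB]
  exact pvDpF_eq_pvSufF num.toList
    ((num.toList.length - 0) * (num.toList.length + 1) + (num.toList.length - 1)) 0 1 le_rfl

-- ===== VERDICT (by name: the statement is the Claim_ definition above) =====
theorem numberOfCombinations_spec : Claim_equal_numberOfCombinations := by
  intro num _ hpre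
  unfold Spec_numberOfCombinations
  exact pv_main num hpre
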